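-- pv_equiv track=rewrite | github.com/The-Vibe-Company/voidline | sim/training/voidline_rl/modal_app.py | _merge_extra_args
-- ===== SOURCE A (Python) =====
-- def _option_name(arg: str) -> str | None:
--     if not arg.startswith("--"):
--         return None
--     return arg.split("=", 1)[0]
--
-- def _override_args_present(extra_args: list[str]) -> set[str]:
--     present: set[str] = set()
--     for arg in extra_args:
--         option = _option_name(arg)
--         if option is not None:
--             present.add(option)
--     return present
--
-- def _merge_extra_args(argv: list[str], extra_args: list[str]) -> list[str]:
--     overrides = _override_args_present(extra_args)
--     if not overrides:
--         return [*argv, *extra_args]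
--
--     merged: list[str] = []
--     index = 0
--     while index < len(argv):
--         arg = argv[index]
--         option = _option_name(arg)
--         if option in overrides:
--             if "=" not in arg and index + 1 < len(argv) and not argv[index + 1].startswith("--"):
--                 index += 2
--             else:
--                 index += 1
--             continue
--         merged.append(arg)
--         index += 1
--     return [*merged, *extra_args]
-- ===== SOURCE B (Python) =====
-- def _option_name(arg: str) -> str | None:
--     if not arg.startswith("--"):
--         return None
--     return arg.split("=", 1)[0]
--
-- def _override_args_present(extra_args: list[str]) -> set[str]:
--     present: set[str] = set()
--     for arg in extra_args:
--         option = _option_name(arg)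
--         if option is not None:
--             present.add(option)
--     return present
--
-- def _segment(argv: list[str]) -> list[tuple[str | None, list[str]]]:
--     """Tokenize argv into segments: ['--opt', value] pairs, or single tokens."""
--     segments: list[tuple[str | None, list[str]]] = []
--     i, n = 0, len(argv)
--     while i < n:
--         arg = argv[i]
--         opt = _option_name(arg)
--         if opt is not None and "=" not in arg and i + 1 < n and not argv[i + 1].startswith("--"):
--             segments.append((opt, [arg, argv[i + 1]]))
--             i += 2
--         else:
--             segments.append((opt, [arg]))
--             i += 1
--     return segments
--
-- def _merge_extra_args(argv: list[str], extra_args: list[str]) -> list[str]: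
--     overrides = _override_args_present(extra_args)
--     segments = _segment(argv)
--     kept = [tok for opt, seg in segments if opt not in overrides for tok in seg]
--     return kept + extra_args
-- ===== Notes on version B (the rewrite author's own statement) =====
-- stated objective: alternative
-- what changed: Replaces A's single index-walk with lookahead and skip-counting by a two-phase decomposition: tokenize argv once into (option, tokens) segments, then filter segments by the overrides set and flatten; the empty-overrides early return disappears because filtering by an empty set keeps everything.
import Mathlib
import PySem

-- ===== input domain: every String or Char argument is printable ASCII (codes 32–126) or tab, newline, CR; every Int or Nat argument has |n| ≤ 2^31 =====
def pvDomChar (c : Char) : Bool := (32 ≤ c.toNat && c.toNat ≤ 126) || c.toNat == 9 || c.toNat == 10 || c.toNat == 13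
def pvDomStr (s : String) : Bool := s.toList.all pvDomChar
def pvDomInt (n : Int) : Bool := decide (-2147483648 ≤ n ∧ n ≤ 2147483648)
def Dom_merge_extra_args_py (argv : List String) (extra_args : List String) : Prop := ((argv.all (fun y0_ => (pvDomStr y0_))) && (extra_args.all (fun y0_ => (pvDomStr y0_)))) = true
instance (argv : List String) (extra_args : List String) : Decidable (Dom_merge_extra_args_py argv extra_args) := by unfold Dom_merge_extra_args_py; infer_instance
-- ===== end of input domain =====

-- ===== PORT A =====
-- B replaces A's index-walk-with-lookahead by a tokenize-then-filter decomposition (alternative structure, same cost).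
-- _option_name(arg): None unless arg starts with "--", else text before the first "=".
def pvOptionName (arg : String) : Option String :=
  if ¬ PySem.Str.startswith arg "--" then none
  else some (((PySem.Str.splitMax? arg "=" 1).getD [arg]).headD arg)

-- Python 'option in overrides' where option : Option String (None is never in a set of strings).
def pvOptIn (opt : Option String) (s : PySem.Set String) : Bool :=
  match opt with
  | some o => PySem.Set.contains s o
  | none => false

def pvOverrideArgsPresent (extra_args : List String) : PySem.Set String :=
  extra_args.foldl (fun present arg =>
    match pvOptionName arg with
    | some o => PySem.Set.add present o
    | none => present) PySem.Set.empty

-- the while-loop of A, state = (merged, index)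
def pvMergeLoopA (argv : List String) (overrides : PySem.Set String)
    (merged : List String) (index : Nat) : List String :=
  if h : index < argv.length then
    let arg := argv[index]
    let option := pvOptionName arg
    if pvOptIn option overrides then
      if ¬ PySem.Str.isIn "=" arg ∧ index + 1 < argv.length ∧
          ¬ PySem.Str.startswith (argv.getD (index + 1) "") "--" then
        pvMergeLoopA argv overrides merged (index + 2)
      else
        pvMergeLoopA argv overrides merged (index + 1)
    else
      pvMergeLoopA argv overrides (merged ++ [arg]) (index + 1)
  else merged
termination_by argv.length - index

def merge_extra_args_py (argv : List String) (extra_args : List String) : List String :=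
  let overrides := pvOverrideArgsPresent extra_args
  if overrides = [] then argv ++ extra_args
  else pvMergeLoopA argv overrides [] 0 ++ extra_args

-- ===== PORT B =====
-- first pass of B: tokenize argv into (option name, tokens) segments (while loop, state = (segments, i))
def pvSegmentLoop (argv : List String) (i : Nat) : List (Option String × List String) :=
  if h : i < argv.length then
    let arg := argv[i]
    let opt := pvOptionName arg
    if opt.isSome ∧ ¬ PySem.Str.isIn "=" arg = true ∧ i + 1 < argv.length ∧
        ¬ PySem.Str.startswith (argv.getD (i + 1) "") "--" = true then
      (opt, [arg, argv.getD (i + 1) ""]) :: pvSegmentLoop argv (i + 2)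
    else
      (opt, [arg]) :: pvSegmentLoop argv (i + 1)
  else []
termination_by argv.length - i

def merge_extra_args_py_alt (argv : List String) (extra_args : List String) : List String :=
  let overrides := pvOverrideArgsPresent extra_args
  let segments := pvSegmentLoop argv 0
  let kept := (segments.filter (fun s => !(pvOptIn s.1 overrides))).flatMap (fun s => s.2)
  kept ++ extra_args

-- ===== PRECONDITION & SPEC =====
def Spec_merge_extra_args_py (argv : List String) (extra_args : List String) (out : List String) : Prop := out = merge_extra_args_py_alt argv extra_args
instance (argv : List String) (extra_args : List String) (out : List String) : Decidable (Spec_merge_extra_args_py argv extra_args out) := by unfold Spec_merge_extra_args_py; infer_instance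

-- ===== CLAIM (what is proved, stated in full; the proofs are below) =====
def Claim_equal_merge_extra_args_py : Prop := ∀ (argv : List String) (extra_args : List String), Dom_merge_extra_args_py argv extra_args → Spec_merge_extra_args_py argv extra_args (merge_extra_args_py argv extra_args)

-- ===== LEMMAS AND PROOFS =====

-- proof-side helper: the segment list as a structural recursion on the token list
def pvSegTok : List String → List (Option String × List String)
  | [] => []
  | [arg] => [(pvOptionName arg, [arg])]
  | arg :: b :: rest' =>
    match pvOptionName arg with
    | some o =>
      if ¬ PySem.Str.isIn "=" arg ∧ ¬ PySem.Str.startswith b "--" then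
        (some o, [arg, b]) :: pvSegTok rest'
      else
        (some o, [arg]) :: pvSegTok (b :: rest')
    | none => (none, [arg]) :: pvSegTok (b :: rest')

-- kept tokens of a segment list under an overrides set (B's second pass, named for the proofs)
def pvKeep (ov : PySem.Set String) (segs : List (Option String × List String)) : List String :=
  (segs.filter (fun s => !(pvOptIn s.1 ov))).flatMap (fun s => s.2)

theorem pvKeep_cons (ov : PySem.Set String) (s : Option String × List String)
    (rest : List (Option String × List String)) :
    pvKeep ov (s :: rest) =
      if pvOptIn s.1 ov then pvKeep ov rest else s.2 ++ pvKeep ov rest := by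
  simp only [pvKeep, List.filter]
  by_cases h : pvOptIn s.1 ov = true <;> simp [h]

-- a token not starting with "--" is positional
theorem pvOptionName_none (b : String) (h : ¬ PySem.Str.startswith b "--" = true) :
    pvOptionName b = none := by
  simp only [pvOptionName]; rw [if_pos h]

-- filtering by the empty set keeps every token: flatten ∘ segment = id
theorem pvKeep_empty (l : List String) : pvKeep [] (pvSegTok l) = l := by
  induction l using pvSegTok.induct with
  | case1 => rfl
  | case2 arg => cases hop : pvOptionName arg <;> simp [pvSegTok, hop, pvKeep, pvOptIn]
  | case3 arg b rest' o hop hc ih =>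
    simp only [pvSegTok, hop]
    rw [if_pos hc, pvKeep_cons]
    simp [pvOptIn, ih]
  | case4 arg b rest' o hop hc ih =>
    simp only [pvSegTok, hop]
    rw [if_neg hc, pvKeep_cons]
    simp [pvOptIn, ih]
  | case5 arg b rest' hop ih =>
    simp only [pvSegTok, hop]
    rw [pvKeep_cons]
    simp [pvOptIn, ih]

-- a positional token is always its own segment
theorem pvSegTok_positional (b : String) (r : List String)
    (hb : pvOptionName b = none) :
    pvSegTok (b :: r) = (none, [b]) :: pvSegTok r := by
  cases r <;> simp [pvSegTok, hb]

-- B's while-loop tokenizer from i is the structural tokenizer of the remaining suffix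
theorem pvSegmentLoop_eq_tok_aux (argv : List String) :
    ∀ (n i : Nat), argv.length - i = n →
      pvSegmentLoop argv i = pvSegTok (argv.drop i) := by
  intro n
  induction n using Nat.strong_induction_on with
  | _ n ih =>
    intro i hn
    rw [pvSegmentLoop]
    by_cases h : i < argv.length
    · have hd : argv.drop i = argv[i] :: argv.drop (i + 1) := List.drop_eq_getElem_cons h
      simp only [dif_pos h]
      cases hop : pvOptionName argv[i] with
      | none =>
        rw [if_neg (by simp), ih (argv.length - (i + 1)) (by omega) (i + 1) rfl, hd,
          pvSegTok_positional _ _ hop]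
      | some o =>
        by_cases h2 : i + 1 < argv.length
        · have hd2 : argv.drop (i + 1) = argv[i + 1] :: argv.drop (i + 2) :=
            List.drop_eq_getElem_cons h2
          have hgd : argv.getD (i + 1) "" = argv[i + 1] := List.getD_eq_getElem _ _ h2
          by_cases hpair : ¬ PySem.Str.isIn "=" argv[i] = true ∧
              ¬ PySem.Str.startswith argv[i + 1] "--" = true
          · rw [if_pos (by rw [hgd]; exact ⟨rfl, hpair.1, h2, hpair.2⟩),
              ih (argv.length - (i + 2)) (by omega) (i + 2) rfl, hd, hd2]
            simp only [pvSegTok, hop]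
            rw [if_pos hpair, hgd]
          · rw [if_neg (by rw [hgd]; tauto),
              ih (argv.length - (i + 1)) (by omega) (i + 1) rfl, hd, hd2]
            simp only [pvSegTok, hop]
            rw [if_neg hpair]
        · have hd2 : argv.drop (i + 1) = [] := List.drop_eq_nil_of_le (by omega)
          rw [if_neg (by tauto), ih (argv.length - (i + 1)) (by omega) (i + 1) rfl, hd, hd2]
          simp [pvSegTok, hop]
    · rw [dif_neg h, List.drop_eq_nil_of_le (by omega)]
      rfl

theorem pvSegmentLoop_eq_tok (argv : List String) :
    pvSegmentLoop argv 0 = pvSegTok argv :=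
  pvSegmentLoop_eq_tok_aux argv _ 0 rfl

-- A's loop from index computes B's keep on the remaining suffix
theorem pvLoopA_eq_keep_aux (argv : List String) (ov : PySem.Set String) :
    ∀ (n index : Nat) (merged : List String), argv.length - index = n →
      pvMergeLoopA argv ov merged index = merged ++ pvKeep ov (pvSegTok (argv.drop index)) := by
  intro n
  induction n using Nat.strong_induction_on with
  | _ n ih =>
    intro index merged hn
    rw [pvMergeLoopA]
    by_cases h : index < argv.length
    · have hd : argv.drop index = argv[index] :: argv.drop (index + 1) :=
        List.drop_eq_getElem_cons h
      simp only [dif_pos h]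
      cases hop : pvOptionName argv[index] with
      | none =>
        have ih1 := ih (argv.length - (index + 1)) (by omega) (index + 1)
          (merged ++ [argv[index]]) rfl
        rw [if_neg (by simp [pvOptIn])]
        show pvMergeLoopA argv ov (merged ++ [argv[index]]) (index + 1) = _
        rw [ih1, hd, pvSegTok_positional _ _ hop, pvKeep_cons]
        simp [pvOptIn]
      | some o =>
        by_cases h2 : index + 1 < argv.length
        · have hd2 : argv.drop (index + 1) = argv[index + 1] :: argv.drop (index + 2) :=
            List.drop_eq_getElem_cons h2
          have hgd : argv.getD (index + 1) "" = argv[index + 1] := List.getD_eq_getElem _ _ h2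
          by_cases hc : pvOptIn (some o) ov = true
          · rw [if_pos hc]
            by_cases habs : ¬ PySem.Str.isIn "=" argv[index] = true ∧
                ¬ PySem.Str.startswith argv[index + 1] "--" = true
            · have ih2 := ih (argv.length - (index + 2)) (by omega) (index + 2) merged rfl
              rw [if_pos (by rw [hgd]; exact ⟨habs.1, h2, habs.2⟩), ih2, hd, hd2]
              simp only [pvSegTok, hop]
              rw [if_pos habs, pvKeep_cons, if_pos hc]
            · have ih1 := ih (argv.length - (index + 1)) (by omega) (index + 1) merged rfl
              rw [if_neg (by rw [hgd]; tauto), ih1, hd, hd2]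
              simp only [pvSegTok, hop]
              rw [if_neg habs, pvKeep_cons, if_pos hc]
          · rw [if_neg hc]
            have ih1 := ih (argv.length - (index + 1)) (by omega) (index + 1)
              (merged ++ [argv[index]]) rfl
            show pvMergeLoopA argv ov (merged ++ [argv[index]]) (index + 1) = _
            rw [ih1, hd, hd2]
            by_cases hpair : ¬ PySem.Str.isIn "=" argv[index] = true ∧
                ¬ PySem.Str.startswith argv[index + 1] "--" = true
            · have hb : pvOptionName argv[index + 1] = none := pvOptionName_none _ hpair.2
              simp only [pvSegTok, hop]
              rw [if_pos hpair, pvSegTok_positional _ _ hb, pvKeep_cons, pvKeep_cons]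
              simp [pvOptIn] at hc
              simp [pvOptIn, hc]
            · simp only [pvSegTok, hop]
              rw [if_neg hpair, pvKeep_cons]
              simp [hc]
        · have hd2 : argv.drop (index + 1) = [] := List.drop_eq_nil_of_le (by omega)
          by_cases hc : pvOptIn (some o) ov = true
          · have ih1 := ih (argv.length - (index + 1)) (by omega) (index + 1) merged rfl
            rw [if_pos hc, if_neg (by tauto), ih1, hd, hd2]
            simp only [pvSegTok, hop]
            simp [hc, pvKeep]
          · have ih1 := ih (argv.length - (index + 1)) (by omega) (index + 1)
              (merged ++ [argv[index]]) rfl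
            rw [if_neg hc]
            show pvMergeLoopA argv ov (merged ++ [argv[index]]) (index + 1) = _
            rw [ih1, hd, hd2]
            simp only [pvSegTok, hop]
            simp [hc, pvKeep]
    · rw [dif_neg h, List.drop_eq_nil_of_le (by omega)]
      simp [pvSegTok, pvKeep]

theorem pvLoopA_eq_keep (argv : List String) (ov : PySem.Set String)
    (index : Nat) (merged : List String) :
    pvMergeLoopA argv ov merged index = merged ++ pvKeep ov (pvSegTok (argv.drop index)) :=
  pvLoopA_eq_keep_aux argv ov _ index merged rfl

-- ===== VERDICT (by name: the statement is the Claim_ definition above) =====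
theorem merge_extra_args_py_spec : Claim_equal_merge_extra_args_py := by
  intro argv extra_args _
  unfold Spec_merge_extra_args_py merge_extra_args_py merge_extra_args_py_alt
  by_cases h : pvOverrideArgsPresent extra_args = []
  · rw [if_pos h, h]
    show argv ++ extra_args = pvKeep [] (pvSegmentLoop argv 0) ++ extra_args
    rw [pvSegmentLoop_eq_tok, pvKeep_empty]
  · rw [if_neg h, pvLoopA_eq_keep argv _ 0 []]
    show pvKeep _ (pvSegTok argv) ++ _ = pvKeep _ (pvSegmentLoop argv 0) ++ _
    rw [pvSegmentLoop_eq_tok]
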